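-- pv_equiv track=rewrite | github.com/maamounhajnajeeb/Problem-Solving-Repo | LeetCode/problem#0073.py | editingWidth
-- ===== SOURCE A (Python) =====
-- def editingWidth(length: int, width: list[int], matrix: list[list[int]]):
--     x: int = 0
--     while x < len(width):
--         if width[x] == 0:
--             for i in range(length):
--                 matrix[i][x] = 0
--         x += 1
--     return matrix
-- ===== SOURCE B (Python) =====
-- def editingWidth(length: int, width: list[int], matrix: list[list[int]]):
--     return [
--         [0 if i < length and x < len(width) and width[x] == 0 else v
--          for x, v in enumerate(row)]
--         for i, row in enumerate(matrix)
--     ]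
-- ===== Notes on version B (the rewrite author's own statement) =====
-- stated objective: alternative
-- what changed: B builds and returns a fresh matrix with one nested comprehension that decides each cell from its row and column index (zero iff the row is among the first `length` and the cell's column has width 0), instead of A's imperative in-place writes that walk columns and overwrite rows; B performs no mutation, so only the return value is claimed equal.
import Mathlib
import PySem

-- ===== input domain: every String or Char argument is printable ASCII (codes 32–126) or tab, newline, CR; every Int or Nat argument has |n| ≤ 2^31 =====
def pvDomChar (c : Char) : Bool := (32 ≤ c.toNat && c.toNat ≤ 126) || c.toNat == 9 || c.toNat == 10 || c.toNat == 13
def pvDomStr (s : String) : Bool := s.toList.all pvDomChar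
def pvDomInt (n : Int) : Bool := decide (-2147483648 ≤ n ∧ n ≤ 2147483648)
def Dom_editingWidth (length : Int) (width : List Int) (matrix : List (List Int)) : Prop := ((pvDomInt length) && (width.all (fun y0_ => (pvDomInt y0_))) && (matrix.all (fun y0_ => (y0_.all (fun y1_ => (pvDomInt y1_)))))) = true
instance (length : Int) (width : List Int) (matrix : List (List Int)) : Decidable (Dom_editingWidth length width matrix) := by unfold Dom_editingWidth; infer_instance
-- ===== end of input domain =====

-- B rebuilds the matrix functionally (one comprehension deciding each cell from its row/column
-- index) instead of A's in-place column-by-column zero writes; equivalence is about the RETURN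
-- value only (Python A mutates `matrix` in place, Python B builds and returns a fresh matrix).


-- ===== PORT A =====
-- matrix[i][x] = 0 : exact on the indices Pre_ admits (0 ≤ i < len(matrix), 0 ≤ x < len(matrix[i]));
-- Pre_ excludes the out-of-range writes on which Python raises IndexError.
def pvSetCell (m : List (List Int)) (i x : Int) : List (List Int) :=
  m.modify i.toNat (fun r => r.set x.toNat 0)

-- the `while x < len(width)` loop: recursion over the remaining suffix of width with counter x
def editingWidthLoop (length : Int) (ws : List Int) (x : Int) (m : List (List Int)) : List (List Int) :=
  match ws with
  | [] => m
  | w :: rest =>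
      editingWidthLoop length rest (x + 1)
        (if w = 0 then (PySem.List.pyRange 0 length 1).foldl (fun m i => pvSetCell m i x) m else m)

def editingWidth (length : Int) (width : List Int) (matrix : List (List Int)) : List (List Int) :=
  editingWidthLoop length width 0 matrix

-- ===== PORT B =====
-- width[x] is guarded by x < len(width) (and x ≥ 0, from enumerate), so pyGetD is exact here.
def editingWidth_alt (length : Int) (width : List Int) (matrix : List (List Int)) : List (List Int) :=
  (PySem.List.enumerate matrix).map (fun p =>
    (PySem.List.enumerate p.2).map (fun q =>
      if p.1 < length ∧ q.1 < (width.length : Int) ∧ PySem.List.pyGetD width q.1 0 = 0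
      then 0 else q.2))

-- ===== PRECONDITION & SPEC =====
-- Pre_ excludes exactly the inputs on which Python A raises IndexError: some zero column while
-- matrix has fewer than `length` rows, or a row among the first `length` shorter than that column.
def Pre_editingWidth (length : Int) (width : List Int) (matrix : List (List Int)) : Prop :=
  ∀ x ∈ List.range width.length, width.getD x 1 = 0 →
    length.toNat ≤ matrix.length ∧ ∀ r ∈ matrix.take length.toNat, x < r.length
instance (length : Int) (width : List Int) (matrix : List (List Int)) : Decidable (Pre_editingWidth length width matrix) := by unfold Pre_editingWidth; infer_instance

def pvWitness_editingWidth : Int × List Int × List (List Int) := (2, [1, 0], [[1, 2], [3, 4]])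


def Spec_editingWidth (length : Int) (width : List Int) (matrix : List (List Int)) (out : List (List Int)) : Prop := out = editingWidth_alt length width matrix
instance (length : Int) (width : List Int) (matrix : List (List Int)) (out : List (List Int)) : Decidable (Spec_editingWidth length width matrix out) := by unfold Spec_editingWidth; infer_instance

-- ===== CLAIM (what is proved, stated in full; the proofs are below) =====
def Claim_equal_editingWidth : Prop := ∀ (length : Int) (width : List Int) (matrix : List (List Int)), Dom_editingWidth length width matrix → Pre_editingWidth length width matrix → Spec_editingWidth length width matrix (editingWidth length width matrix)


-- ===== LEMMAS AND PROOFS =====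

-- the zero-valued column indices of ws, counting from s (A zeroes exactly these columns)
def pvZerosFrom : List Int → Int → List Int
  | [], _ => []
  | w :: rest, s => if w = 0 then s :: pvZerosFrom rest (s + 1) else pvZerosFrom rest (s + 1)

theorem pvZeros_mem (ws : List Int) : ∀ (s j : Int),
    j ∈ pvZerosFrom ws s ↔ s ≤ j ∧ j - s < (ws.length : Int) ∧ ws.getD (j - s).toNat 1 = 0 := by
  induction ws with
  | nil => intro s j; simp [pvZerosFrom]
  | cons w rest ih =>
      intro s j
      have hsplit : s ≤ j → j ≠ s → (j - s).toNat = (j - (s + 1)).toNat + 1 := by omega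
      by_cases hw : w = 0
      · simp only [pvZerosFrom, if_pos hw, List.mem_cons, ih, List.length_cons]
        constructor
        · rintro (rfl | ⟨h1, h2, h3⟩)
          · simpa using hw
          · refine ⟨by omega, by push_cast; omega, ?_⟩
            rw [hsplit (by omega) (by omega), List.getD_cons_succ]
            exact h3
        · rintro ⟨h1, h2, h3⟩
          by_cases hjs : j = s
          · exact Or.inl hjs
          · refine Or.inr ⟨by omega, by push_cast at h2 ⊢; omega, ?_⟩
            rwa [hsplit h1 hjs, List.getD_cons_succ] at h3
      · simp only [pvZerosFrom, if_neg hw, ih, List.length_cons]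
        constructor
        · rintro ⟨h1, h2, h3⟩
          refine ⟨by omega, by push_cast; omega, ?_⟩
          rw [hsplit (by omega) (by omega), List.getD_cons_succ]
          exact h3
        · rintro ⟨h1, h2, h3⟩
          by_cases hjs : j = s
          · subst hjs; simp at h3; exact absurd h3 hw
          · refine ⟨by omega, by push_cast at h2 ⊢; omega, ?_⟩
            rwa [hsplit h1 hjs, List.getD_cons_succ] at h3

theorem pvZeros_nonneg (ws : List Int) (s j : Int) (h : j ∈ pvZerosFrom ws s) : s ≤ j :=
  ((pvZeros_mem ws s j).mp h).1

-- one zero column: the pyRange-foldl of pvSetCell sets that column in rows 0..length-1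
theorem pvFoldRange_get (z : Int) : ∀ (n : Nat) (m : List (List Int)) (i : Nat),
    (((List.range n).map Int.ofNat).foldl (fun m i' => pvSetCell m i' z) m)[i]?
      = if i < n then (m[i]?).map (fun r => r.set z.toNat 0) else m[i]? := by
  intro n
  induction n with
  | zero => intro m i; simp
  | succ n ih =>
      intro m i
      rw [List.range_succ, List.map_append, List.foldl_append]
      simp only [List.map_cons, List.map_nil, List.foldl_cons, List.foldl_nil]
      rw [pvSetCell, List.getElem?_modify, ih]
      have hn : (Int.ofNat n).toNat = n := rfl
      rw [hn]
      by_cases h : i < n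
      · have h1 : i < n + 1 := by omega
        have h2 : n ≠ i := by omega
        simp [h, h1, h2]
      · by_cases h2 : n = i
        · subst h2; simp
        · have h3 : ¬ i < n + 1 := by omega
          simp [h, h2, h3]

theorem pvZ_get (length z : Int) (m : List (List Int)) (i : Nat) :
    ((PySem.List.pyRange 0 length 1).foldl (fun m i' => pvSetCell m i' z) m)[i]?
      = if i < length.toNat then (m[i]?).map (fun r => r.set z.toNat 0) else m[i]? := by
  have hr : PySem.List.pyRange 0 length 1 = (List.range length.toNat).map Int.ofNat := by
    rw [PySem.List.pyRange_one]
    simp [Int.ofNat_eq_natCast]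
  rw [hr, pvFoldRange_get]

-- row i of A's loop: the zero columns of ws get set in the first length.toNat rows
theorem pvLoop_get (length : Int) (ws : List Int) : ∀ (x : Int) (m : List (List Int)) (i : Nat),
    (editingWidthLoop length ws x m)[i]?
      = if i < length.toNat then
          (m[i]?).map (fun row => (pvZerosFrom ws x).foldl (fun r z => r.set z.toNat 0) row)
        else m[i]? := by
  induction ws with
  | nil =>
      intro x m i
      simp only [editingWidthLoop, pvZerosFrom, List.foldl_nil]
      split <;> simp
  | cons w rest ih =>
      intro x m i
      by_cases hw : w = 0
      · simp only [editingWidthLoop, if_pos hw]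
        rw [ih, pvZ_get]
        by_cases h : i < length.toNat
        · simp only [if_pos h, Option.map_map, pvZerosFrom, if_pos hw, List.foldl_cons]
          rfl
        · simp [h]
      · simp only [editingWidthLoop, if_neg hw]
        rw [ih]
        simp [pvZerosFrom, hw]

-- within one row: folding the set-writes over the zero columns, cell by cell
theorem pvSetFold_get : ∀ (zs : List Int), (∀ z ∈ zs, 0 ≤ z) → ∀ (row : List Int) (j : Nat),
    (zs.foldl (fun r z => r.set z.toNat 0) row)[j]?
      = if (j : Int) ∈ zs then (row[j]?).map (fun _ => (0 : Int)) else row[j]? := by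
  intro zs
  induction zs with
  | nil => intro _ row j; simp
  | cons z rest ih =>
      intro hnn row j
      simp only [List.foldl_cons, List.mem_cons]
      rw [ih (fun z hz => hnn z (List.mem_cons_of_mem _ hz))]
      by_cases hzj : z = (j : Int)
      · have hz : z.toNat = j := by have := hnn z List.mem_cons_self; omega
        rw [hz]
        by_cases hjr : j < row.length
        · split <;> simp [hjr, hzj]
        · have hnone : row[j]? = none := by simp; omega
          have hnone2 : (row.set j 0)[j]? = none := by simp; omega
          split <;> simp [hnone, hnone2]
      · have hne : z.toNat ≠ j := by have := hnn z List.mem_cons_self; omega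
        have hset : (row.set z.toNat 0)[j]? = row[j]? := List.getElem?_set_ne hne
        rw [hset]
        have h' : ¬((j : Int) = z) := fun h => hzj h.symm
        simp [h']

-- ===== VERDICT (by name: the statement is the Claim_ definition above) =====
theorem editingWidth_spec : Claim_equal_editingWidth := by
  intro length width matrix _ _
  unfold Spec_editingWidth editingWidth editingWidth_alt
  apply List.ext_getElem?
  intro i
  rw [pvLoop_get]
  rw [List.getElem?_map, PySem.List.getElem?_enumerate]
  cases hm : matrix[i]? with
  | none => simp
  | some row =>
      simp only [Option.map_some]
      by_cases hL : i < length.toNat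
      · rw [if_pos hL]
        simp only [Option.some.injEq]
        apply List.ext_getElem?
        intro j
        rw [pvSetFold_get _ (fun z hz => pvZeros_nonneg width 0 z hz)]
        rw [List.getElem?_map, PySem.List.getElem?_enumerate]
        have hiL : (0 : Int) + (i : Int) < length := by omega
        cases hrow : row[j]? with
        | none => simp
        | some v =>
            simp only [Option.map_some]
            by_cases hz : (j : Int) ∈ pvZerosFrom width 0
            · have hc := (pvZeros_mem width 0 (j : Int)).mp hz
              have hjw : j < width.length := by
                have := hc.2.1; push_cast at this ⊢; omega
              have hg : PySem.List.pyGetD width ((0 : Int) + (j : Int)) 0 = 0 := by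
                rw [zero_add, PySem.List.pyGetD_natCast]
                have h3 := hc.2.2
                simp only [sub_zero, Int.toNat_natCast] at h3
                rw [List.getD_eq_getElem _ _ hjw] at h3 ⊢
                exact h3
              rw [if_pos hz, if_pos ⟨hiL, by omega, hg⟩]
            · rw [if_neg hz, if_neg]
              rintro ⟨-, h2, h3⟩
              apply hz
              rw [pvZeros_mem]
              rw [zero_add] at h3
              have hjw : j < width.length := by omega
              rw [PySem.List.pyGetD_natCast, List.getD_eq_getElem _ _ hjw] at h3
              refine ⟨by omega, by omega, ?_⟩
              simp only [sub_zero, Int.toNat_natCast]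
              rwa [List.getD_eq_getElem _ _ hjw]
      · rw [if_neg hL]
        simp only [Option.some.injEq]
        have hiL : ¬ ((0 : Int) + (i : Int) < length) := by omega
        conv_lhs => rw [← PySem.List.map_snd_enumerate row 0]
        apply List.map_congr_left
        intro q hq
        rw [if_neg]
        rintro ⟨h1, -⟩
        exact hiL h1
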